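-- pv_equiv track=rewrite | github.com/Vijay6923/Recursion-solution | 900/axix.py | minimize_total_distance
-- ===== SOURCE A (Python) =====
-- def minimize_total_distance(test_cases):
--     results = []
--     for x1, x2, x3 in test_cases:
--         points = sorted([x1, x2, x3])
--         median = points[1]
--         total_distance = abs(median - points[0]) + abs(median - points[1]) + abs(median - points[2])
--         results.append(total_distance)
--     return results
-- ===== SOURCE B (Python) =====
-- def minimize_total_distance(test_cases):
--     return [max(x1, x2, x3) - min(x1, x2, x3) for x1, x2, x3 in test_cases]
-- ===== Notes on version B (the rewrite author's own statement) =====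
-- stated objective: simpler
-- what changed: Replaces the sort + median + three abs-distance sums per triple with the closed form max - min (the total distance to the median of three points equals the range), emitted by a single comprehension.
import Mathlib
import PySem

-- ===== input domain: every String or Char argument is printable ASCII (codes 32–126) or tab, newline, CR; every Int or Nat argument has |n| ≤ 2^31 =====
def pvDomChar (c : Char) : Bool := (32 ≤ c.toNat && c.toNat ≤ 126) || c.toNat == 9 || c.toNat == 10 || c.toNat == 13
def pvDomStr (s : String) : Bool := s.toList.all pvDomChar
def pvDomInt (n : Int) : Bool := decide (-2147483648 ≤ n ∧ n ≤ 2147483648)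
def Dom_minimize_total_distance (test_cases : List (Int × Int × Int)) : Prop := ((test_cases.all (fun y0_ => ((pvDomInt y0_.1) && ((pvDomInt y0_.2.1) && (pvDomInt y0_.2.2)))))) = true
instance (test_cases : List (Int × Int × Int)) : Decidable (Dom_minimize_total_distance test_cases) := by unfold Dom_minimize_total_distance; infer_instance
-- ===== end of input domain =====

-- B replaces the per-triple sort + median + abs-distance sum with the closed form max - min (simpler).


-- ===== PORT A =====
-- points[i] is always in range (3-element list), so pyGet? always returns some; .getD 0 only discharges the option.
def minimize_total_distance (test_cases : List (Int × Int × Int)) : List Int :=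
  test_cases.foldl (fun results tc =>
    let points := PySem.List.sorted [tc.1, tc.2.1, tc.2.2] (fun x => x) false
    let median := (PySem.List.pyGet? points 1).getD 0
    let total_distance := |median - (PySem.List.pyGet? points 0).getD 0|
      + |median - (PySem.List.pyGet? points 1).getD 0|
      + |median - (PySem.List.pyGet? points 2).getD 0|
    results ++ [total_distance]) []

-- ===== PORT B =====
def minimize_total_distance_alt (test_cases : List (Int × Int × Int)) : List Int :=
  test_cases.map (fun tc => max tc.1 (max tc.2.1 tc.2.2) - min tc.1 (min tc.2.1 tc.2.2))

-- ===== PRECONDITION & SPEC =====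
def Spec_minimize_total_distance (test_cases : List (Int × Int × Int)) (out : List Int) : Prop := out = minimize_total_distance_alt test_cases
instance (test_cases : List (Int × Int × Int)) (out : List Int) : Decidable (Spec_minimize_total_distance test_cases out) := by unfold Spec_minimize_total_distance; infer_instance

-- ===== CLAIM (what is proved, stated in full; the proofs are below) =====
def Claim_equal_minimize_total_distance : Prop := ∀ (test_cases : List (Int × Int × Int)), Dom_minimize_total_distance test_cases → Spec_minimize_total_distance test_cases (minimize_total_distance test_cases)

-- ===== LEMMAS AND PROOFS =====

-- sorted of a three-element list is any ordered rearrangement of it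
theorem pv_sorted3 (a b c p q r : Int) (h1 : p ≤ q) (h2 : q ≤ r)
    (hp : [p,q,r].Perm [a,b,c]) :
    PySem.List.sorted [a,b,c] (fun x => x) false = [p,q,r] :=
  PySem.List.sorted_id_eq_of_perm_of_pairwise _ _ hp (by simp [List.pairwise_cons]; omega)

-- A's per-triple body, given an ordered rearrangement [p,q,r], equals B's closed form max - min
theorem pv_body (a b c p q r : Int) (h1 : p ≤ q) (h2 : q ≤ r)
    (hp : [p,q,r].Perm [a,b,c]) :
    (let points := PySem.List.sorted [a,b,c] (fun x => x) false
     let median := (PySem.List.pyGet? points 1).getD 0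
     |median - (PySem.List.pyGet? points 0).getD 0|
      + |median - (PySem.List.pyGet? points 1).getD 0|
      + |median - (PySem.List.pyGet? points 2).getD 0|)
    = max a (max b c) - min a (min b c) := by
  have ha : a ∈ [p,q,r] := (hp.mem_iff).mpr (by simp)
  have hb : b ∈ [p,q,r] := (hp.mem_iff).mpr (by simp)
  have hc : c ∈ [p,q,r] := (hp.mem_iff).mpr (by simp)
  have hpm : p ∈ [a,b,c] := (hp.mem_iff).mp (by simp)
  have hrm : r ∈ [a,b,c] := (hp.mem_iff).mp (by simp)
  simp only [List.mem_cons, List.not_mem_nil, or_false] at ha hb hc hpm hrm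
  simp only [pv_sorted3 a b c p q r h1 h2 hp, PySem.List.pyGet?, PySem.List.pyIdx?]
  norm_num [show (2:Int).toNat = 2 from rfl, List.getElem_cons_succ, List.getElem_cons_zero]
  rw [abs_of_nonneg (show (0:Int) ≤ q - p by omega), abs_of_nonpos (show q - r ≤ (0:Int) by omega)]
  omega

-- A's per-triple body equals B's closed form, by cases on the order of a, b, c
theorem pv_triple_eq (a b c : Int) :
    (let points := PySem.List.sorted [a, b, c] (fun x => x) false
     let median := (PySem.List.pyGet? points 1).getD 0
     |median - (PySem.List.pyGet? points 0).getD 0|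
      + |median - (PySem.List.pyGet? points 1).getD 0|
      + |median - (PySem.List.pyGet? points 2).getD 0|)
    = max a (max b c) - min a (min b c) := by
  rcases le_total a b with hab | hab <;> rcases le_total b c with hbc | hbc <;>
    rcases le_total a c with hac | hac
  · exact pv_body a b c a b c hab hbc (List.Perm.refl _)
  · exact pv_body a b c a b c hab hbc (List.Perm.refl _)
  · exact pv_body a b c a c b hac hbc (List.Perm.cons a (List.Perm.swap b c []))
  · exact pv_body a b c c a b hac hab ((List.Perm.swap a c [b]).trans (List.Perm.cons a (List.Perm.swap b c [])))
  · exact pv_body a b c b a c hab hac (List.Perm.swap a b [c])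
  · exact pv_body a b c b c a hbc hac ((List.Perm.cons b (List.Perm.swap a c [])).trans (List.Perm.swap a b [c]))
  · exact pv_body a b c c b a hbc hab ((List.Perm.swap b c [a]).trans ((List.Perm.cons b (List.Perm.swap a c [])).trans (List.Perm.swap a b [c])))
  · exact pv_body a b c c b a hbc hab ((List.Perm.swap b c [a]).trans ((List.Perm.cons b (List.Perm.swap a c [])).trans (List.Perm.swap a b [c])))

-- the foldl-append accumulator is a map
theorem pv_foldA (test_cases : List (Int × Int × Int)) (acc : List Int) :
    (test_cases.foldl (fun results tc =>
      let points := PySem.List.sorted [tc.1, tc.2.1, tc.2.2] (fun x => x) false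
      let median := (PySem.List.pyGet? points 1).getD 0
      let total_distance := |median - (PySem.List.pyGet? points 0).getD 0|
        + |median - (PySem.List.pyGet? points 1).getD 0|
        + |median - (PySem.List.pyGet? points 2).getD 0|
      results ++ [total_distance]) acc)
    = acc ++ test_cases.map (fun tc => max tc.1 (max tc.2.1 tc.2.2) - min tc.1 (min tc.2.1 tc.2.2)) := by
  induction test_cases generalizing acc with
  | nil => simp
  | cons hd tl ih =>
    obtain ⟨a, b, c⟩ := hd
    simp only [List.foldl, List.map, ih]
    rw [pv_triple_eq]
    simp

-- ===== VERDICT (by name: the statement is the Claim_ definition above) =====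
theorem minimize_total_distance_spec : Claim_equal_minimize_total_distance := by
  intro tcs _
  unfold Spec_minimize_total_distance minimize_total_distance minimize_total_distance_alt
  simpa using pv_foldA tcs []
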